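-- pv_equiv track=rewrite | github.com/Whizzion957/ML_CST104 | calculator.py | checking
-- ===== SOURCE A (Python) =====
-- def checking(expression):
--     valids='0123456789.+-*/%!()'
--     for i,c in enumerate(expression):
--         if c not in valids:
--             return False
--         if c in '+*/%' and (i==0 or expression[i-1] in '+*/%-('):
--             return False
--         if c == ')' and (i == 0 or expression[i-1] in '+*/%-('):
--             return False
--         if c == '(' and (i != 0 and (expression[i-1].isdigit() or expression[i-1] == '.')):
--             return False
--         if c == '!' and (i == 0 or not expression[i-1].isdigit()):
--             return False
--     return True
-- ===== SOURCE B (Python) =====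
-- def checking(expression):
--     # Staged bigram-blacklist check: one membership pass, a first-char test,
--     # then a scan of adjacent pairs against a precomputed forbidden-pair set.
--     valids = '0123456789.+-*/%!()'
--     digits = '0123456789'
--     # Stage 1: every character must come from the valid alphabet.
--     if any(c not in valids for c in expression):
--         return False
--     # Stage 2: the first character may not be an operator, ')' or '!'.
--     if expression and expression[0] in '+*/%)!':
--         return False
--     # Stage 3: no adjacent pair may be a forbidden bigram.
--     forbidden = {(p, c) for p in '+*/%-(' for c in '+*/%)'}
--     forbidden |= {(p, '(') for p in digits + '.'}
--     forbidden |= {(p, '!') for p in valids if p not in digits}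
--     return not any(pc in forbidden for pc in zip(expression, expression[1:]))
-- ===== Notes on version B (the rewrite author's own statement) =====
-- stated objective: alternative
-- what changed: Replaces A's single indexed loop of per-branch expression[i-1] tests with three staged passes: an alphabet-membership scan, a first-character test, and a scan of zipped adjacent pairs against a precomputed forbidden-bigram set.
import Mathlib
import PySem

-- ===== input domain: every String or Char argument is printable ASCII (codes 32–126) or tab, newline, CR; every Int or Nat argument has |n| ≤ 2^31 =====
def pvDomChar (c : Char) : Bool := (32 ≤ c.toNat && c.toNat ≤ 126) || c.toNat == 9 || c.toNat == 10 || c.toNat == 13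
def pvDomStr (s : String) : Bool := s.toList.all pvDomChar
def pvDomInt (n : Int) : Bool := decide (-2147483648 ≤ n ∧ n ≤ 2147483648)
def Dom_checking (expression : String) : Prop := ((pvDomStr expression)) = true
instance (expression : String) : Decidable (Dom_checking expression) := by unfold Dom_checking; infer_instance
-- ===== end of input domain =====

-- B replaces A's single indexed loop (per-branch tests of expression[i-1]) by three staged
-- passes: an alphabet-membership pass, a first-char test, and a scan of adjacent pairs
-- against a precomputed forbidden-bigram set; objective: alternative (same cost).

-- ===== PORT A =====
def checkingValids : List Char := "0123456789.+-*/%!()".toList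

def checkingLoop (cs : List Char) : List (Int × Char) → Bool
  | [] => true
  | (i, c) :: rest =>
    if !(checkingValids.contains c) then false
    else if ("+*/%".toList.contains c)
           && (decide (i = 0) || (PySem.List.pyGet? cs (i - 1)).any
                 (fun p => "+*/%-(".toList.contains p)) then false
    else if (c == ')')
           && (decide (i = 0) || (PySem.List.pyGet? cs (i - 1)).any
                 (fun p => "+*/%-(".toList.contains p)) then false
    else if (c == '(')
           && (decide (i ≠ 0) && (PySem.List.pyGet? cs (i - 1)).any
                 (fun p => PySem.Chars.isdigit p || p == '.')) then false
    else if (c == '!')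
           && (decide (i = 0) || !((PySem.List.pyGet? cs (i - 1)).any PySem.Chars.isdigit)) then false
    else checkingLoop cs rest

def checking (expression : String) : Bool :=
  checkingLoop expression.toList (PySem.List.enumerate expression.toList 0)

-- ===== PORT B =====
def altValids : List Char := "0123456789.+-*/%!()".toList
def altDigits : List Char := "0123456789".toList

def altForbidden : List (Char × Char) :=
  PySem.Set.ofList
    (("+*/%-(".toList.flatMap (fun p => "+*/%)".toList.map (fun c => (p, c))))
      ++ ((altDigits ++ ['.']).map (fun p => (p, '(')))
      ++ ((altValids.filter (fun p => !(altDigits.contains p))).map (fun p => (p, '!'))))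

def checking_alt (expression : String) : Bool :=
  let cs := expression.toList
  if cs.any (fun c => !(altValids.contains c)) then false
  else if (match cs with | [] => false | c :: _ => "+*/%)!".toList.contains c) then false
  else !((cs.zip cs.tail).any (fun pc => altForbidden.contains pc))

-- ===== PRECONDITION & SPEC =====
def Spec_checking (expression : String) (out : Bool) : Prop := out = checking_alt expression
instance (expression : String) (out : Bool) : Decidable (Spec_checking expression out) := by unfold Spec_checking; infer_instance

-- ===== CLAIM (what is proved, stated in full; the proofs are below) =====
def Claim_equal_checking : Prop := ∀ (expression : String), Dom_checking expression → Spec_checking expression (checking expression)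

-- ===== LEMMAS AND PROOFS =====

-- A's loop with the index replaced by the previous character (none = i==0)
def gA : Option Char → List Char → Bool
  | _, [] => true
  | prev, c :: rest =>
    if !(checkingValids.contains c) then false
    else if ("+*/%".toList.contains c)
           && (prev.elim true (fun p => "+*/%-(".toList.contains p)) then false
    else if (c == ')')
           && (prev.elim true (fun p => "+*/%-(".toList.contains p)) then false
    else if (c == '(')
           && (prev.elim false (fun p => PySem.Chars.isdigit p || p == '.')) then false
    else if (c == '!')
           && (prev.elim true (fun p => !(PySem.Chars.isdigit p))) then false
    else gA (some c) rest

def badPairA (p c : Char) : Bool :=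
  (("+*/%".toList.contains c) && ("+*/%-(".toList.contains p))
    || ((c == ')') && ("+*/%-(".toList.contains p))
    || ((c == '(') && (PySem.Chars.isdigit p || p == '.'))
    || ((c == '!') && !(PySem.Chars.isdigit p))

lemma prev_get (pre rest : List Char) (p : Char) (h : pre.getLast? = some p) :
    PySem.List.pyGet? (pre ++ rest) ((pre.length : Int) - 1) = some p := by
  have hne : pre ≠ [] := by rintro rfl; simp at h
  have hlen : 1 ≤ pre.length := List.length_pos_of_ne_nil hne
  rw [show ((pre.length : Int) - 1) = ((pre.length - 1 : Nat) : Int) by omega]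
  rw [PySem.List.pyGet?_natCast]
  rw [List.getElem?_append_left (by omega)]
  rw [← List.getLast?_eq_getElem?]
  exact h

-- A's indexed loop computes gA of the last character of the consumed prefix
lemma loop_eq_gA (rest : List Char) : ∀ (pre : List Char),
    checkingLoop (pre ++ rest) (PySem.List.enumerate rest (pre.length : Int))
      = gA pre.getLast? rest := by
  induction rest with
  | nil => intro pre; simp [PySem.List.enumerate_nil, checkingLoop, gA]
  | cons c rest ih =>
    intro pre
    rw [PySem.List.enumerate_cons]
    have hrec : checkingLoop (pre ++ c :: rest) (PySem.List.enumerate rest ((pre.length : Int) + 1))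
        = gA (some c) rest := by
      have h := ih (pre ++ [c])
      simpa using h
    cases hpre : pre.getLast? with
    | none =>
      have : pre = [] := by
        cases pre with
        | nil => rfl
        | cons a l => simp [List.getLast?_eq_getElem?] at hpre
      subst this
      simp only [List.nil_append, List.length_nil, Nat.cast_zero, zero_add] at hrec ⊢
      simp [checkingLoop, gA, hrec]
    | some p =>
      have hne : pre ≠ [] := by rintro rfl; simp at hpre
      have hlp : 1 ≤ pre.length := List.length_pos_of_ne_nil hne
      have d1 : (decide (((pre.length : Int)) = 0)) = false := by simp; omega
      have d2 : (decide ¬(((pre.length : Int)) = 0)) = true := by simp; omega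
      have hget := prev_get pre (c :: rest) p hpre
      simp only [checkingLoop, gA, Option.elim, d1, d2, hget, Option.any_some,
        Bool.false_or, Bool.true_and]
      rw [hrec]
      rfl

-- the forbidden-bigram set agrees with A's adjacency tests on valid characters
set_option maxRecDepth 8000 in
lemma forbidden_eq_badPair : ∀ p ∈ altValids, ∀ c ∈ altValids,
    altForbidden.contains (p, c) = badPairA p c := by
  intro p hp c hc
  simp only [show altValids = ['0','1','2','3','4','5','6','7','8','9','.','+','-','*','/','%','!','(',')'] from rfl,
    List.mem_cons, List.not_mem_nil, or_false] at hp hc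
  rcases hp with rfl|rfl|rfl|rfl|rfl|rfl|rfl|rfl|rfl|rfl|rfl|rfl|rfl|rfl|rfl|rfl|rfl|rfl|rfl <;>
    rcases hc with rfl|rfl|rfl|rfl|rfl|rfl|rfl|rfl|rfl|rfl|rfl|rfl|rfl|rfl|rfl|rfl|rfl|rfl|rfl <;> rfl

-- an if-chain of four rejection tests, as one conjunction
lemma chain5 (v b1 b2 b3 b4 x : Bool) :
    (if !v then false
     else if b1 then false
     else if b2 then false
     else if b3 then false
     else if b4 then false
     else x)
      = (v && !(b1 || b2 || b3 || b4) && x) := by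
  cases v <;> cases b1 <;> cases b2 <;> cases b3 <;> cases b4 <;> rfl

-- the two staged rejection tests of checking_alt, as one conjunction
lemma alt_chain (a h p : Bool) :
    (if a then false else if h then false else !p) = (!a && !h && !p) := by
  cases a <;> cases h <;> cases p <;> rfl

-- one step of gA after a previous character, as a conjunction
lemma gA_cons (p c : Char) (cs : List Char) :
    gA (some p) (c :: cs)
      = ((altValids.contains c) && !(badPairA p c) && gA (some c) cs) := by
  show (if !(altValids.contains c) then false
        else if ("+*/%".toList.contains c) && ("+*/%-(".toList.contains p) then false
        else if (c == ')') && ("+*/%-(".toList.contains p) then false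
        else if (c == '(') && (PySem.Chars.isdigit p || p == '.') then false
        else if (c == '!') && !(PySem.Chars.isdigit p) then false
        else gA (some c) cs) = _
  rw [chain5]
  rfl

-- the first step of gA (start of string), as a conjunction
lemma gA_none_cons (c : Char) (cs : List Char) :
    gA none (c :: cs)
      = ((altValids.contains c)
          && !(("+*/%".toList.contains c) || (c == ')') || (c == '!'))
          && gA (some c) cs) := by
  show (if !(altValids.contains c) then false
        else if ("+*/%".toList.contains c) && true then false
        else if (c == ')') && true then false
        else if (c == '(') && false then false
        else if (c == '!') && true then false
        else gA (some c) cs) = _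
  rw [chain5]
  simp only [Bool.and_true, Bool.and_false, Bool.or_false]

-- the first-character class agrees with A's start-of-string tests
lemma head_class (c : Char) :
    ("+*/%)!".toList.contains c)
      = (("+*/%".toList.contains c) || (c == ')') || (c == '!')) := by
  simp only [List.contains_eq_mem,
    show ("+*/%)!".toList) = ['+','*','/','%',')','!'] from rfl,
    show ("+*/%".toList) = ['+','*','/','%'] from rfl, List.mem_cons, List.not_mem_nil,
    or_false]
  by_cases h1 : c = '+' <;> by_cases h2 : c = '*' <;> by_cases h3 : c = '/' <;>
    by_cases h4 : c = '%' <;> by_cases h5 : c = ')' <;> by_cases h6 : c = '!' <;>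
    simp [h1, h2, h3, h4, h5, h6]

-- gA after a valid previous character = validity pass && forbidden-pair scan
lemma gA_some_eq (cs : List Char) : ∀ p ∈ altValids,
    gA (some p) cs
      = ((cs.all (fun c => altValids.contains c))
          && !(((p :: cs).zip cs).any (fun pc => altForbidden.contains pc))) := by
  induction cs with
  | nil => intro p _; simp [gA]
  | cons c cs ih =>
    intro p hp
    rw [gA_cons]
    cases hc : altValids.contains c with
    | false => rw [List.all_cons, hc]; simp
    | true =>
      have hcv : c ∈ altValids := by simpa [List.contains_eq_mem] using hc
      rw [ih c hcv]
      simp only [List.zip_cons_cons, List.any_cons, List.all_cons, hc, Bool.true_and,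
        forbidden_eq_badPair p hp c hcv]
      cases badPairA p c <;>
        cases cs.all (fun c => altValids.contains c) <;>
        cases ((c :: cs).zip cs).any (fun pc => altForbidden.contains pc) <;> rfl

-- Bool bridge: "some character is invalid" vs "all characters valid"
lemma any_not_eq_not_all (cs : List Char) :
    (cs.any (fun c => !(altValids.contains c)))
      = !(cs.all (fun c => altValids.contains c)) := by
  induction cs with
  | nil => rfl
  | cons c cs ih =>
    simp only [List.any_cons, List.all_cons, ih]
    cases altValids.contains c <;> cases cs.all (fun c => altValids.contains c) <;> rfl

-- ===== VERDICT (by name: the statement is the Claim_ definition above) =====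
theorem checking_spec : Claim_equal_checking := by
  intro expression _
  unfold Spec_checking checking checking_alt
  have h := loop_eq_gA expression.toList []
  simp only [List.nil_append, List.length_nil, Nat.cast_zero, List.getLast?_nil] at h
  rw [h]
  cases hcs : expression.toList with
  | nil => simp [gA]
  | cons c cs =>
    rw [gA_none_cons, ← head_class]
    show _ = (if ((c :: cs).any fun x => !(altValids.contains x)) then false
              else if ("+*/%)!".toList.contains c) then false
              else !(((c :: cs).zip (c :: cs).tail).any fun pc => altForbidden.contains pc))
    rw [show ((c :: cs).any (fun x => !(altValids.contains x)))
          = ((!(altValids.contains c)) || !(cs.all (fun x => altValids.contains x)))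
        from by rw [List.any_cons, any_not_eq_not_all]]
    rw [alt_chain]
    cases hc : altValids.contains c with
    | false => simp
    | true =>
      have hcv : c ∈ altValids := by simpa [List.contains_eq_mem] using hc
      rw [gA_some_eq cs c hcv]
      simp only [Bool.not_true, Bool.false_or, Bool.true_and, List.tail_cons]
      cases ("+*/%)!".toList.contains c) <;>
        cases cs.all (fun x => altValids.contains x) <;>
        cases ((c :: cs).zip cs).any (fun pc => altForbidden.contains pc) <;> rfl
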